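-- pv_equiv track=rewrite | github.com/amirfarhat/rotornet-simulations | simulator/matchings.py | _distribute_matchings
-- ===== SOURCE A (Python) =====
-- def _distribute_matchings(matchings, num_tors, num_rotor_switches):
--     num_matchings = num_tors - 1
--     matchings_per_sw, leftovers = divmod(num_matchings, num_rotor_switches)
--     rotor_switches = [[] for _ in range(num_rotor_switches)]
--     # deal with the quotient
--     m = 0
--     for r in range(num_rotor_switches):
--         for _ in range(matchings_per_sw):
--             rotor_switches[r].append(matchings[m])
--             m += 1
--     # deal with the remainder
--     for r in range(leftovers):
--         rotor_switches[r].append(matchings[m])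
--         m += 1
--     return rotor_switches
-- ===== SOURCE B (Python) =====
-- def _distribute_matchings(matchings, num_tors, num_rotor_switches):
--     q, rem = divmod(num_tors - 1, num_rotor_switches)
--     boundary = q * num_rotor_switches
--     return [matchings[r * q:(r + 1) * q]
--             + ([matchings[boundary + r]] if r < rem else [])
--             for r in range(num_rotor_switches)]
-- ===== Notes on version B (the rewrite author's own statement) =====
-- stated objective: simpler
-- what changed: A's two-phase imperative fill (nested quotient loop then a remainder loop, both appending through a shared running counter m into pre-built mutable buckets) is replaced by a single comprehension that constructs each bucket independently as a contiguous slice matchings[r*q:(r+1)*q] plus, for the first rem buckets, the one leftover element matchings[q*num_rotor_switches + r]; no counter, no mutation, no nested loop.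
-- outside the precondition, e.g. on _distribute_matchings([[7]], 0, 2): A returns [[[7]], []], B raises IndexError; on _distribute_matchings([[7], [8]], 0, 1): A returns [[]], B returns [[[7]]]
import Mathlib
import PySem

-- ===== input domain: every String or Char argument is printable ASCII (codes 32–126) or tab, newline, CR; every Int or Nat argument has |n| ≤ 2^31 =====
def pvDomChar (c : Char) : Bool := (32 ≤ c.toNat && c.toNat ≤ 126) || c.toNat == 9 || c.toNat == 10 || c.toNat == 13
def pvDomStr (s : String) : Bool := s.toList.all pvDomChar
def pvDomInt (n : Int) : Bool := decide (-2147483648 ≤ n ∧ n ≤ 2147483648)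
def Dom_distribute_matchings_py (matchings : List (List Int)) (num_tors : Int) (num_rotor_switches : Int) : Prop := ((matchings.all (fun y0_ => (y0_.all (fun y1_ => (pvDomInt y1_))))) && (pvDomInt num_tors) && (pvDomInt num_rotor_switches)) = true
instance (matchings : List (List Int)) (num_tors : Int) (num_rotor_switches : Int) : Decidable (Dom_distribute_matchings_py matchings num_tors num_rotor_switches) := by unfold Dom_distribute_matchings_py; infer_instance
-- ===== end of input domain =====

-- B replaces A's two-phase imperative fill (nested quotient loop, then a remainder loop, both appending
-- through a shared running counter into pre-built mutable buckets) by a single comprehension that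
-- builds each bucket independently as a contiguous slice plus its optional leftover element ("simpler").

-- `rotor_switches[j].append(x)` — exact for 0 ≤ j < rs.length, the only indices either program uses
def pyBucketAppend (rs : List (List (List Int))) (j : Int) (x : List Int) : List (List (List Int)) :=
  rs.modify j.toNat (fun b => b ++ [x])

-- ===== PORT A =====
def distribute_matchings_py (matchings : List (List Int)) (num_tors : Int) (num_rotor_switches : Int) : List (List (List Int)) :=
  let num_matchings := num_tors - 1
  match PySem.Int.divmod? num_matchings num_rotor_switches with
  | none => []  -- Python raises ZeroDivisionError here; excluded by Pre_
  | some (matchings_per_sw, leftovers) =>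
    let rotor_switches : List (List (List Int)) := (PySem.List.pyRange 0 num_rotor_switches 1).map (fun _ => [])
    -- deal with the quotient (state = (rotor_switches, m)); matchings[m] via pyGetD: in range under Pre_
    let s1 := (PySem.List.pyRange 0 num_rotor_switches 1).foldl
      (fun (st : List (List (List Int)) × Int) r =>
        (PySem.List.pyRange 0 matchings_per_sw 1).foldl
          (fun (st : List (List (List Int)) × Int) _ =>
            (pyBucketAppend st.1 r (PySem.List.pyGetD matchings st.2 []), st.2 + 1)) st)
      (rotor_switches, 0)
    -- deal with the remainder
    let s2 := (PySem.List.pyRange 0 leftovers 1).foldl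
      (fun (st : List (List (List Int)) × Int) r =>
        (pyBucketAppend st.1 r (PySem.List.pyGetD matchings st.2 []), st.2 + 1)) s1
    s2.1

-- ===== PORT B =====
def distribute_matchings_py_alt (matchings : List (List Int)) (num_tors : Int) (num_rotor_switches : Int) : List (List (List Int)) :=
  match PySem.Int.divmod? (num_tors - 1) num_rotor_switches with
  | none => []  -- Python raises ZeroDivisionError here; excluded by Pre_
  | some (q, rem) =>
    let boundary := q * num_rotor_switches
    (PySem.List.pyRange 0 num_rotor_switches 1).map (fun r =>
      PySem.List.slice matchings (some (r * q)) (some ((r + 1) * q)) ++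
      -- matchings[boundary + r] via pyGetD: in range under Pre_
      (if r < rem then [PySem.List.pyGetD matchings (boundary + r) []] else []))

-- ===== PRECONDITION & SPEC =====
-- Pre_ restricts to the natural domain: either a positive switch count with 1 ≤ num_tors ≤ len+1
-- (so every index A uses is in range), or a negative switch count (both programs return []).
-- Excluded: num_rotor_switches = 0 (A raises ZeroDivisionError); num_tors - 1 > len (A raises
-- IndexError); and num_tors ≤ 0 with a positive switch count — a nonsensical ToR count outside the
-- natural domain, where A's remainder loop still appends leading matchings as leftover state of its
-- negative quotient while B's slicing raises IndexError or returns a different value.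
def Pre_distribute_matchings_py (matchings : List (List Int)) (num_tors : Int) (num_rotor_switches : Int) : Prop :=
  (0 < num_rotor_switches ∧ 0 ≤ num_tors - 1 ∧ num_tors - 1 ≤ (matchings.length : Int))
  ∨ num_rotor_switches < 0
instance (matchings : List (List Int)) (num_tors : Int) (num_rotor_switches : Int) : Decidable (Pre_distribute_matchings_py matchings num_tors num_rotor_switches) := by unfold Pre_distribute_matchings_py; infer_instance

def pvWitness_distribute_matchings_py : List (List Int) × Int × Int := ([[1], [2], [3]], 4, 2)

def Spec_distribute_matchings_py (matchings : List (List Int)) (num_tors : Int) (num_rotor_switches : Int) (out : List (List (List Int))) : Prop := out = distribute_matchings_py_alt matchings num_tors num_rotor_switches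
instance (matchings : List (List Int)) (num_tors : Int) (num_rotor_switches : Int) (out : List (List (List Int))) : Decidable (Spec_distribute_matchings_py matchings num_tors num_rotor_switches out) := by unfold Spec_distribute_matchings_py; infer_instance

-- ===== CLAIM (what is proved, stated in full; the proofs are below) =====
def Claim_equal_distribute_matchings_py : Prop := ∀ (matchings : List (List Int)) (num_tors : Int) (num_rotor_switches : Int), Dom_distribute_matchings_py matchings num_tors num_rotor_switches → Pre_distribute_matchings_py matchings num_tors num_rotor_switches → Spec_distribute_matchings_py matchings num_tors num_rotor_switches (distribute_matchings_py matchings num_tors num_rotor_switches)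

-- ===== LEMMAS AND PROOFS =====

-- the common step A performs (append matchings[m] to bucket j, bump m), run over a list of bucket indices
def runSeq (matchings : List (List Int)) (seq : List Int) (st : List (List (List Int)) × Int) : List (List (List Int)) × Int :=
  seq.foldl (fun st j => (pyBucketAppend st.1 j (PySem.List.pyGetD matchings st.2 []), st.2 + 1)) st

theorem runSeq_append (matchings : List (List Int)) (s1 s2 : List Int) (st : List (List (List Int)) × Int) :
    runSeq matchings (s1 ++ s2) st = runSeq matchings s2 (runSeq matchings s1 st) := by
  simp [runSeq, List.foldl_append]

-- A's inner loop (append `matchings_per_sw` copies to bucket r) is runSeq over replicated r's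
theorem inner_eq_runSeq (matchings : List (List Int)) (q r : Int) (st : List (List (List Int)) × Int) :
    (PySem.List.pyRange 0 q 1).foldl
      (fun (st : List (List (List Int)) × Int) _ =>
        (pyBucketAppend st.1 r (PySem.List.pyGetD matchings st.2 []), st.2 + 1)) st
    = runSeq matchings (List.replicate q.toNat r) st := by
  have h : List.replicate q.toNat r = (PySem.List.pyRange 0 q 1).map (fun _ => r) := by
    rw [List.map_const', PySem.List.length_pyRange_one]; norm_num
  rw [h, runSeq, List.foldl_map]

-- A, for any divisor ≠ 0, is runSeq over the index sequence [0]*q ++ [1]*q ++ … ++ [R-1]*q ++ [0..r)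
theorem A_char (matchings : List (List Int)) (num_tors num_rotor_switches : Int)
    (hR0 : num_rotor_switches ≠ 0) :
    distribute_matchings_py matchings num_tors num_rotor_switches
    = (runSeq matchings
        ((PySem.List.pyRange 0 num_rotor_switches 1).flatMap
            (fun j => List.replicate (PySem.Int.floordiv (num_tors - 1) num_rotor_switches).toNat j)
          ++ PySem.List.pyRange 0 (PySem.Int.mod (num_tors - 1) num_rotor_switches) 1)
        ((PySem.List.pyRange 0 num_rotor_switches 1).map (fun _ => []), 0)).1 := by
  unfold distribute_matchings_py
  dsimp only
  rw [show PySem.Int.divmod? (num_tors - 1) num_rotor_switches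
      = some (PySem.Int.floordiv (num_tors - 1) num_rotor_switches,
              PySem.Int.mod (num_tors - 1) num_rotor_switches) from by
    simp only [PySem.Int.divmod?, if_neg hR0]; rfl]
  dsimp only
  rw [runSeq_append]
  have houter : (PySem.List.pyRange 0 num_rotor_switches 1).foldl
      (fun (st : List (List (List Int)) × Int) r =>
        (PySem.List.pyRange 0 (PySem.Int.floordiv (num_tors - 1) num_rotor_switches) 1).foldl
          (fun (st : List (List (List Int)) × Int) _ =>
            (pyBucketAppend st.1 r (PySem.List.pyGetD matchings st.2 []), st.2 + 1)) st)
      ((PySem.List.pyRange 0 num_rotor_switches 1).map (fun _ => []), 0)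
      = runSeq matchings
        ((PySem.List.pyRange 0 num_rotor_switches 1).flatMap
          (fun j => List.replicate (PySem.Int.floordiv (num_tors - 1) num_rotor_switches).toNat j))
        ((PySem.List.pyRange 0 num_rotor_switches 1).map (fun _ => []), 0) := by
    have hcong := PySem.List.foldl_congr_mem
      (l := PySem.List.pyRange 0 num_rotor_switches 1)
      (init := ((PySem.List.pyRange 0 num_rotor_switches 1).map (fun _ => ([] : List (List Int))), (0 : Int)))
      (f := fun (st : List (List (List Int)) × Int) r =>
        (PySem.List.pyRange 0 (PySem.Int.floordiv (num_tors - 1) num_rotor_switches) 1).foldl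
          (fun (st : List (List (List Int)) × Int) _ =>
            (pyBucketAppend st.1 r (PySem.List.pyGetD matchings st.2 []), st.2 + 1)) st)
      (g := fun (st : List (List (List Int)) × Int) r =>
        runSeq matchings
          (List.replicate (PySem.Int.floordiv (num_tors - 1) num_rotor_switches).toNat r) st)
      (fun st r _ =>
        inner_eq_runSeq matchings (PySem.Int.floordiv (num_tors - 1) num_rotor_switches) r st)
    rw [hcong]
    simp only [runSeq]
    exact (List.foldl_flatMap).symm
  rw [← houter]
  rfl

-- what the counter-driven appends contribute to bucket j: matchings[c+p] for each position p with seq[p] = j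
def contrib (matchings : List (List Int)) (j : Int) : List Int → Int → List (List Int)
  | [], _ => []
  | i :: t, c =>
    (if i = j then [PySem.List.pyGetD matchings c []] else []) ++ contrib matchings j t (c + 1)

theorem runSeq_length (matchings : List (List Int)) (seq : List Int) (st : List (List (List Int)) × Int) :
    (runSeq matchings seq st).1.length = st.1.length := by
  induction seq generalizing st with
  | nil => rfl
  | cons i t ih =>
    show (runSeq matchings t _).1.length = _
    rw [ih]
    simp [pyBucketAppend, List.length_modify]

theorem runSeq_getElem? (matchings : List (List Int)) (seq : List Int)
    (hseq : ∀ i ∈ seq, 0 ≤ i) (st : List (List (List Int)) × Int) (j : Nat) :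
    (runSeq matchings seq st).1[j]? = (st.1[j]?).map (· ++ contrib matchings (j : Int) seq st.2) := by
  induction seq generalizing st with
  | nil =>
    cases h : st.1[j]? <;> simp [runSeq, contrib, h]
  | cons i t ih =>
    have hi : 0 ≤ i := hseq i (List.mem_cons_self ..)
    have step : runSeq matchings (i :: t) st
        = runSeq matchings t (pyBucketAppend st.1 i (PySem.List.pyGetD matchings st.2 []), st.2 + 1) := rfl
    rw [step, ih (fun x hx => hseq x (List.mem_cons_of_mem _ hx))]
    simp only [pyBucketAppend, List.getElem?_modify]
    cases h : st.1[j]? with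
    | none => simp
    | some b =>
      simp only [Option.map_some]
      by_cases hij : i = (j : Int)
      · have : i.toNat = j := by omega
        simp [contrib, hij, List.append_assoc]
      · have : i.toNat ≠ j := by omega
        simp [this, contrib, hij]

theorem contrib_append (matchings : List (List Int)) (j : Int) (s t : List Int) (c : Int) :
    contrib matchings j (s ++ t) c = contrib matchings j s c ++ contrib matchings j t (c + s.length) := by
  induction s generalizing c with
  | nil => simp [contrib]
  | cons i s ih =>
    simp only [List.cons_append, contrib, ih (c + 1), List.length_cons, List.append_assoc]
    congr 2
    push_cast
    ring_nf

theorem contrib_replicate_self (matchings : List (List Int)) (j : Int) (n : Nat) (c : Int) :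
    contrib matchings j (List.replicate n j) c
    = (List.range n).map (fun p : Nat => PySem.List.pyGetD matchings (c + (p : Int)) []) := by
  induction n generalizing c with
  | zero => simp [contrib]
  | succ k ih =>
    rw [List.replicate_succ]
    have hstep : contrib matchings j (j :: List.replicate k j) c
        = [PySem.List.pyGetD matchings c []] ++ contrib matchings j (List.replicate k j) (c + 1) := by
      simp [contrib]
    rw [hstep, ih (c + 1), List.range_succ_eq_map, List.map_cons, List.map_map,
      List.singleton_append]
    congr 1
    · congr 1; omega
    · apply List.map_congr_left
      intro p _
      simp only [Function.comp]
      congr 1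
      push_cast
      ring

theorem contrib_replicate_ne (matchings : List (List Int)) (j i : Int) (hij : i ≠ j) (n : Nat) (c : Int) :
    contrib matchings j (List.replicate n i) c = [] := by
  induction n generalizing c with
  | zero => rfl
  | succ k ih => simp [List.replicate_succ, contrib, hij, ih]

-- contribution of the quotient blocks [a]*nq ++ [a+1]*nq ++ … : only bucket j's own block survives
theorem contrib_blocks (matchings : List (List Int)) (nq : Nat) (j : Int) (k : Nat) :
    ∀ (a c : Int),
    contrib matchings j ((PySem.List.pyRange a (a + k) 1).flatMap (fun i => List.replicate nq i)) c
    = if a ≤ j ∧ j < a + k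
      then (List.range nq).map (fun p : Nat => PySem.List.pyGetD matchings (c + (j - a) * (nq : Int) + (p : Int)) [])
      else [] := by
  induction k with
  | zero =>
    intro a c
    rw [PySem.List.pyRange_one_eq_nil (by omega : a + ((0 : Nat) : Int) ≤ a)]
    have : ¬ (a ≤ j ∧ j < a + ((0 : Nat) : Int)) := by push_cast; omega
    simp [contrib]
  | succ n ih =>
    intro a c
    have hlt : a < a + ((n + 1 : Nat) : Int) := by push_cast; omega
    have hre : a + ((n + 1 : Nat) : Int) = (a + 1) + ((n : Nat) : Int) := by push_cast; ring
    rw [PySem.List.pyRange_one_cons hlt, hre]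
    rw [List.flatMap_cons, contrib_append, ih (a + 1)]
    by_cases hja : j = a
    · subst hja
      rw [contrib_replicate_self]
      have hc : ¬ (j + 1 ≤ j ∧ j < j + 1 + ((n : Nat) : Int)) := by omega
      rw [if_neg hc, if_pos (by omega)]
      simp only [sub_self, zero_mul, List.append_nil]
      apply List.map_congr_left
      intro p _
      congr 1
      ring
    · rw [contrib_replicate_ne matchings j a (fun h => hja h.symm), List.nil_append]
      by_cases hin : a + 1 ≤ j ∧ j < a + 1 + ((n : Nat) : Int)
      · rw [if_pos hin, if_pos (by omega)]
        apply List.map_congr_left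
        intro p _
        congr 1
        simp only [List.length_replicate]
        ring
      · rw [if_neg hin, if_neg (by omega)]

-- contribution of the remainder pass [a, a+1, …): at most one element, at counter offset j - a
theorem contrib_range (matchings : List (List Int)) (j : Int) (k : Nat) :
    ∀ (a c : Int),
    contrib matchings j (PySem.List.pyRange a (a + k) 1) c
    = if a ≤ j ∧ j < a + k then [PySem.List.pyGetD matchings (c + (j - a)) []] else [] := by
  induction k with
  | zero =>
    intro a c
    rw [PySem.List.pyRange_one_eq_nil (by omega : a + ((0 : Nat) : Int) ≤ a)]
    have : ¬ (a ≤ j ∧ j < a + ((0 : Nat) : Int)) := by push_cast; omega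
    simp [contrib]
  | succ n ih =>
    intro a c
    have hlt : a < a + ((n + 1 : Nat) : Int) := by push_cast; omega
    have hre : a + ((n + 1 : Nat) : Int) = (a + 1) + ((n : Nat) : Int) := by push_cast; ring
    rw [PySem.List.pyRange_one_cons hlt, hre]
    rw [show ∀ t c', contrib matchings j (a :: t) c'
        = (if a = j then [PySem.List.pyGetD matchings c' []] else []) ++ contrib matchings j t (c' + 1)
      from fun _ _ => rfl]
    rw [ih (a + 1)]
    by_cases hja : a = j
    · subst hja
      have hc : ¬ (a + 1 ≤ a ∧ a < a + 1 + ((n : Nat) : Int)) := by omega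
      rw [if_pos rfl, if_neg hc, if_pos (by omega)]
      simp
    · rw [if_neg hja, List.nil_append]
      by_cases hin : a + 1 ≤ j ∧ j < a + 1 + ((n : Nat) : Int)
      · rw [if_pos hin, if_pos (by omega)]
        congr 2
        ring
      · rw [if_neg hin, if_neg (by omega)]

-- a contiguous run of in-range indexing is a drop/take chunk
theorem chunk_eq_map_range (m : List (List Int)) (s t : Nat) (h : s + t ≤ m.length) :
    (m.drop s).take t = (List.range t).map (fun p : Nat => PySem.List.pyGetD m ((s : Int) + (p : Int)) []) := by
  apply List.ext_getElem
  · simp; omega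
  · intro p h1 h2
    have hp : p < t := by simp at h1; omega
    have hsp : s + p < m.length := by omega
    simp only [List.getElem_take, List.getElem_drop, List.getElem_map, List.getElem_range]
    rw [show (s : Int) + (p : Int) = ((s + p : Nat) : Int) by push_cast; ring,
      PySem.List.pyGetD_natCast, List.getD_eq_getElem _ _ hsp]

-- ===== VERDICT (by name: the statement is the Claim_ definition above) =====
theorem distribute_matchings_py_spec : Claim_equal_distribute_matchings_py := by
  intro matchings num_tors num_rotor_switches _ hPre
  unfold Spec_distribute_matchings_py
  rcases hPre with ⟨hRpos, hn0, hnlen⟩ | hRneg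
  · -- main case: 0 < R, 0 ≤ n ≤ len
    have hR0 : num_rotor_switches ≠ 0 := by omega
    rw [A_char matchings num_tors num_rotor_switches hR0]
    unfold distribute_matchings_py_alt
    rw [show PySem.Int.divmod? (num_tors - 1) num_rotor_switches
        = some (PySem.Int.floordiv (num_tors - 1) num_rotor_switches,
                PySem.Int.mod (num_tors - 1) num_rotor_switches) from by
      simp only [PySem.Int.divmod?, if_neg hR0]; rfl]
    dsimp only
    set q := PySem.Int.floordiv (num_tors - 1) num_rotor_switches with hq_def
    set rem := PySem.Int.mod (num_tors - 1) num_rotor_switches with hr_def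
    have hq0 : 0 ≤ q := by
      have := (PySem.Int.le_floordiv_iff_mul_le
        (a := num_tors - 1) (b := num_rotor_switches) (q := 0) hRpos)
      simp at this
      omega
    have hrem0 : 0 ≤ rem := PySem.Int.mod_nonneg _ hRpos
    have hremR : rem < num_rotor_switches := PySem.Int.mod_lt _ hRpos
    have hsum : q * num_rotor_switches + rem = num_tors - 1 :=
      PySem.Int.floordiv_mul_add_mod (num_tors - 1) num_rotor_switches
    apply List.ext_getElem
    · rw [runSeq_length]
      simp
    · intro k hk1 hk2
      have hkN : k < (num_rotor_switches - 0).toNat := by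
        have h := hk1
        rw [runSeq_length] at h
        simpa using h
      have hkR : (k : Int) < num_rotor_switches := by omega
      -- A's bucket k via contrib
      have hseq : ∀ i ∈ (PySem.List.pyRange 0 num_rotor_switches 1).flatMap
            (fun j => List.replicate q.toNat j) ++ PySem.List.pyRange 0 rem 1, 0 ≤ i := by
        intro i hi
        rcases List.mem_append.1 hi with hi | hi
        · obtain ⟨j, hj, hij⟩ := List.mem_flatMap.1 hi
          have := (PySem.List.mem_pyRange_one).1 hj
          have := List.eq_of_mem_replicate hij
          omega
        · have := (PySem.List.mem_pyRange_one).1 hi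
          omega
      have hA := runSeq_getElem? matchings _ hseq
        ((PySem.List.pyRange 0 num_rotor_switches 1).map (fun _ => ([] : List (List Int))), 0) k
      have hinit : ((PySem.List.pyRange 0 num_rotor_switches 1).map
          (fun _ => ([] : List (List Int))))[k]? = some [] := by
        apply List.getElem?_eq_getElem
          (by simp only [List.length_map, PySem.List.length_pyRange_one]; omega) |>.trans
        simp
      rw [hinit] at hA
      have hAk := congrArg (fun o => o.getD []) hA
      simp only [Option.map_some, Option.getD_some] at hAk
      rw [List.getElem?_eq_getElem hk1, Option.getD_some] at hAk
      rw [hAk, List.nil_append]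
      -- evaluate contrib on the two parts
      have hflatlen : (((PySem.List.pyRange 0 num_rotor_switches 1).flatMap
          (fun j => List.replicate q.toNat j)).length : Int) = q * num_rotor_switches := by
        have hconst : ∀ a ∈ PySem.List.pyRange 0 num_rotor_switches 1,
            (List.replicate q.toNat a).length = q.toNat := fun a _ => by simp
        rw [List.length_flatMap, List.map_congr_left hconst, List.map_const',
          List.sum_replicate, PySem.List.length_pyRange_one, smul_eq_mul]
        push_cast
        rw [show (((num_rotor_switches - 0).toNat : Nat) : Int) = num_rotor_switches by omega,
          show ((q.toNat : Int)) = q by omega]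
        ring
      have hblocks := contrib_blocks matchings q.toNat (k : Int) num_rotor_switches.toNat 0 0
      rw [show (0 : Int) + ((num_rotor_switches.toNat : Nat) : Int) = num_rotor_switches by omega] at hblocks
      have hrange := contrib_range matchings (k : Int) rem.toNat 0
        (0 + (((PySem.List.pyRange 0 num_rotor_switches 1).flatMap
          (fun j => List.replicate q.toNat j)).length : Int))
      rw [show (0 : Int) + ((rem.toNat : Nat) : Int) = rem by omega] at hrange
      rw [contrib_append, hblocks, hrange, if_pos ⟨by omega, hkR⟩, hflatlen]
      -- B's bucket k
      have hB := PySem.List.getElem?_map_pyRange_zero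
        (fun r => PySem.List.slice matchings (some (r * q)) (some ((r + 1) * q)) ++
          (if r < rem then [PySem.List.pyGetD matchings (q * num_rotor_switches + r) []] else []))
        num_rotor_switches.toNat k (by omega)
      rw [show ((num_rotor_switches.toNat : Nat) : Int) = num_rotor_switches by omega] at hB
      rw [List.getElem?_eq_getElem hk2] at hB
      rw [Option.some.inj hB]
      dsimp only
      -- slice part = chunk
      have hkq0 : (0 : Int) ≤ (k : Int) * q := by positivity
      have hslice : PySem.List.slice matchings (some ((k : Int) * q)) (some (((k : Int) + 1) * q))
          = (matchings.drop ((k : Int) * q).toNat).take q.toNat := by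
        rw [PySem.List.slice_toNat matchings (by positivity) (by positivity)]
        have h1 : (((k : Int) + 1) * q).toNat = ((k : Int) * q).toNat + q.toNat := by
          have h2 : ((k : Int) + 1) * q = (k : Int) * q + q := by ring
          rw [h2]; omega
        rw [h1, Nat.add_sub_cancel_left]
      rw [hslice]
      have hkq_le : ((k : Int) * q).toNat + q.toNat ≤ matchings.length := by
        have h1 : (k : Int) * q + q ≤ q * num_rotor_switches := by
          have hk1R : (k : Int) + 1 ≤ num_rotor_switches := by omega
          calc (k : Int) * q + q = ((k : Int) + 1) * q := by ring
          _ ≤ num_rotor_switches * q := by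
            apply mul_le_mul_of_nonneg_right hk1R hq0
          _ = q * num_rotor_switches := by ring
        have h2 : q * num_rotor_switches ≤ num_tors - 1 := by omega
        omega
      rw [chunk_eq_map_range matchings (((k : Int) * q).toNat) q.toNat hkq_le]
      congr 1
      · -- the chunks agree
        apply List.map_congr_left
        intro p _
        congr 1
        rw [Int.toNat_of_nonneg (by positivity : (0 : Int) ≤ (k : Int) * q)]
        rw [show ((q.toNat : Int)) = q by omega]
        ring
      · -- the leftover element agrees
        by_cases hkrem : (k : Int) < rem
        · rw [if_pos (⟨by omega, hkrem⟩ : (0 : Int) ≤ (k : Int) ∧ (k : Int) < rem), if_pos hkrem]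
          congr 2
          ring
        · rw [if_neg (show ¬ ((0 : Int) ≤ (k : Int) ∧ (k : Int) < rem) by omega), if_neg hkrem]
  · -- R < 0: both sides are []
    have hR0 : num_rotor_switches ≠ 0 := by omega
    rw [A_char matchings num_tors num_rotor_switches hR0]
    unfold distribute_matchings_py_alt
    rw [show PySem.Int.divmod? (num_tors - 1) num_rotor_switches
        = some (PySem.Int.floordiv (num_tors - 1) num_rotor_switches,
                PySem.Int.mod (num_tors - 1) num_rotor_switches) from by
      simp only [PySem.Int.divmod?, if_neg hR0]; rfl]
    dsimp only
    have hrem := PySem.Int.mod_neg_bounds (num_tors - 1) hRneg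
    rw [PySem.List.pyRange_one_eq_nil (by omega : num_rotor_switches ≤ 0),
      PySem.List.pyRange_one_eq_nil (by omega : PySem.Int.mod (num_tors - 1) num_rotor_switches ≤ 0)]
    simp [runSeq]
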